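-- pv_equiv track=rewrite | github.com/kubow/kids-projects | games/schematic.py | _decode_packed_blockstates
-- ===== SOURCE A (Python) =====
-- import math
--
-- def _signed_to_unsigned_64(value: int) -> int:
--     return value & 0xFFFFFFFFFFFFFFFF
--
-- def _decode_packed_blockstates(values, palette_size: int, total_blocks: int):
--     bits_per_block = max(2, math.ceil(math.log2(max(1, palette_size))))
--     mask = (1 << bits_per_block) - 1
--     decoded = []
--     bit_buffer = 0
--     bits_in_buffer = 0
--
--     for value in values:
--         bit_buffer |= _signed_to_unsigned_64(value) << bits_in_buffer
--         bits_in_buffer += 64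
--         while bits_in_buffer >= bits_per_block and len(decoded) < total_blocks:
--             decoded.append(bit_buffer & mask)
--             bit_buffer >>= bits_per_block
--             bits_in_buffer -= bits_per_block
--
--     if len(decoded) < total_blocks:
--         raise ValueError("Packed schematic block states ended before filling the declared volume.")
--     return decoded[:total_blocks]
-- ===== SOURCE B (Python) =====
-- import math
--
--
-- def _decode_packed_blockstates(values, palette_size: int, total_blocks: int):
--     # Per-output-index gather: instead of streaming longs through a shared bit
--     # buffer, compute each block's bit window directly from the longs it spans.
--     bits_per_block = max(2, math.ceil(math.log2(max(1, palette_size))))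
--     mask = (1 << bits_per_block) - 1
--     if total_blocks * bits_per_block > 64 * len(values):
--         raise ValueError("Packed schematic block states ended before filling the declared volume.")
--     decoded = []
--     for j in range(total_blocks):
--         start = j * bits_per_block
--         idx0, off = divmod(start, 64)
--         idx1 = (start + bits_per_block - 1) // 64
--         word = 0
--         for k, v in enumerate(values[idx0:idx1 + 1]):
--             word |= (v & 0xFFFFFFFFFFFFFFFF) << (64 * k)
--         decoded.append((word >> off) & mask)
--     return decoded
-- ===== Notes on version B (the rewrite author's own statement) =====
-- stated objective: faster
-- what changed: Replaces the streaming shared bit-buffer accumulator (interleaved fill/drain loops) with a per-block random-access gather: the ValueError is decided up front by the bit-count inequality, then each block is extracted by shift-and-mask from only the longs it spans, so no growing big-integer buffer is ever built.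
import Mathlib
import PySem

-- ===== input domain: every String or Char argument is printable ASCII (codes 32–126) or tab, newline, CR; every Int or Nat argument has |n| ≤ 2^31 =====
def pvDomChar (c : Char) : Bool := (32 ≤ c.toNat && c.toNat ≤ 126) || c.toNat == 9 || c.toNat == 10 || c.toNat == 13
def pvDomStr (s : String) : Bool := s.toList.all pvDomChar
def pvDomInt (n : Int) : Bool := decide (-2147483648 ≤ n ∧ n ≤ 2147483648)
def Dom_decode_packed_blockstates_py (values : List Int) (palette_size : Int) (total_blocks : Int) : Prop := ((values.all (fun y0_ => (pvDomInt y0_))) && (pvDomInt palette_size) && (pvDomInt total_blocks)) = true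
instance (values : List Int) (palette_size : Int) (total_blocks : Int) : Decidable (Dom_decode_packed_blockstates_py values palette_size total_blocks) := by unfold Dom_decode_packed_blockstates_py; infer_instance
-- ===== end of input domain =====

-- B replaces A's streaming bit-buffer accumulator with a per-block gather that locates the
-- spanned longs by index arithmetic and extracts each block with one shift-and-mask; the timing
-- run measured B faster (A's buffer keeps absorbing longs once total_blocks is reached).


-- helpers shared by the two ports (both Pythons compute them with the same expressions)

-- Python `value & 0xFFFFFFFFFFFFFFFF`: &-ing with the all-ones 64-bit mask is reduction mod 2^64
-- (exact; the result is a nonnegative integer, so we keep it as a Nat).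
def pvU64 (v : Int) : Nat := (v % ((2 : Int) ^ 64)).toNat

-- Python `max(2, math.ceil(math.log2(max(1, palette_size))))`; ceil(log2 n) = Nat.clog 2 n,
-- exact on the domain |palette_size| ≤ 2^31 (double-precision log2 cannot misround there).
def pvBPB (palette_size : Int) : Nat := max 2 (Nat.clog 2 (max 1 palette_size).toNat)

-- ===== PORT A =====
-- the inner `while bits_in_buffer >= bits_per_block and len(decoded) < total_blocks` loop
-- (the `0 < bpb` conjunct is only a totality guard; the caller always passes bpb ≥ 2)
def pvDrain (bpb mask : Nat) (total_blocks : Int) (decoded : List Int) (buf bits : Nat) :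
    List Int × Nat × Nat :=
  if h : 0 < bpb ∧ bpb ≤ bits ∧ (decoded.length : Int) < total_blocks then
    pvDrain bpb mask total_blocks (decoded ++ [((buf &&& mask : Nat) : Int)]) (buf >>> bpb) (bits - bpb)
  else (decoded, buf, bits)
  termination_by bits
  decreasing_by omega

def decode_packed_blockstates_py (values : List Int) (palette_size : Int) (total_blocks : Int) : List Int :=
  let bpb := pvBPB palette_size
  let mask := (1 <<< bpb) - 1
  let st := values.foldl
    (fun (st : List Int × Nat × Nat) value =>
      pvDrain bpb mask total_blocks st.1 (st.2.1 ||| (pvU64 value <<< st.2.2)) (st.2.2 + 64))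
    ([], 0, 0)
  if (st.1.length : Int) < total_blocks then []  -- raise ValueError (excluded by Pre_)
  else PySem.List.slice st.1 none (some total_blocks)

-- ===== PORT B =====
-- `word = 0; for k, v in enumerate(values[idx0:idx1+1]): word |= (v & M64) << (64*k)`
def pvGather (xs : List Int) : Nat :=
  (PySem.List.enumerate xs 0).foldl
    (fun w kv => w ||| (pvU64 kv.2 <<< (64 * kv.1).toNat)) 0

def decode_packed_blockstates_py_alt (values : List Int) (palette_size : Int) (total_blocks : Int) : List Int :=
  let bpb := pvBPB palette_size
  let mask := (1 <<< bpb) - 1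
  if 64 * (values.length : Int) < total_blocks * (bpb : Int) then []  -- raise ValueError (excluded by Pre_)
  else
    (PySem.List.pyRange 0 total_blocks 1).map (fun j =>
      let start := j.toNat * bpb          -- j ranges over range(total_blocks), so j ≥ 0
      let idx0 := start / 64
      let off := start % 64
      let idx1 := (start + bpb - 1) / 64
      let word := pvGather (PySem.List.slice values (some (idx0 : Int)) (some ((idx1 : Int) + 1)))
      (((word >>> off) &&& mask : Nat) : Int))

-- ===== PRECONDITION & SPEC =====
-- Pre_ excludes exactly the inputs on which A raises ValueError (the longs carry fewer than
-- total_blocks * bits_per_block bits); B raises the same ValueError there.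
def Pre_decode_packed_blockstates_py (values : List Int) (palette_size : Int) (total_blocks : Int) : Prop :=
  total_blocks * (pvBPB palette_size : Int) ≤ 64 * (values.length : Int)
instance (values : List Int) (palette_size : Int) (total_blocks : Int) : Decidable (Pre_decode_packed_blockstates_py values palette_size total_blocks) := by unfold Pre_decode_packed_blockstates_py; infer_instance

def pvWitness_decode_packed_blockstates_py : List Int × Int × Int := ([1], 5, 2)

def Spec_decode_packed_blockstates_py (values : List Int) (palette_size : Int) (total_blocks : Int) (out : List Int) : Prop := out = decode_packed_blockstates_py_alt values palette_size total_blocks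
instance (values : List Int) (palette_size : Int) (total_blocks : Int) (out : List Int) : Decidable (Spec_decode_packed_blockstates_py values palette_size total_blocks out) := by unfold Spec_decode_packed_blockstates_py; infer_instance

-- ===== CLAIM (what is proved, stated in full; the proofs are below) =====
def Claim_equal_decode_packed_blockstates_py : Prop := ∀ (values : List Int) (palette_size : Int) (total_blocks : Int), Dom_decode_packed_blockstates_py values palette_size total_blocks → Pre_decode_packed_blockstates_py values palette_size total_blocks → Spec_decode_packed_blockstates_py values palette_size total_blocks (decode_packed_blockstates_py values palette_size total_blocks)

-- ===== LEMMAS AND PROOFS =====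

-- the value of the infinite bit string: big = Σ v_i · 2^(64 i)
def pvBig : List Nat → Nat
  | [] => 0
  | v :: vs => v + 2 ^ 64 * pvBig vs

-- block j of the bit string
def pvExtract (B bpb j : Nat) : Nat := B / 2 ^ (j * bpb) % 2 ^ bpb

theorem pvU64_lt (v : Int) : pvU64 v < 2 ^ 64 := by
  unfold pvU64
  have h := Int.emod_lt_of_pos v (b := (2:Int)^64) (by norm_num)
  omega

theorem pvBig_lt (xs : List Int) : pvBig (xs.map pvU64) < 2 ^ (64 * xs.length) := by
  induction xs with
  | nil => simp [pvBig]
  | cons v vs ih =>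
    have h := pvU64_lt v
    simp only [List.map_cons, pvBig, List.length_cons]
    have : 2 ^ (64 * (vs.length + 1)) = 2 ^ 64 * 2 ^ (64 * vs.length) := by
      rw [← pow_add]; ring_nf
    nlinarith [ih, h]

theorem pvBig_append (xs ys : List Nat) :
    pvBig (xs ++ ys) = pvBig xs + 2 ^ (64 * xs.length) * pvBig ys := by
  induction xs with
  | nil => simp [pvBig]
  | cons v vs ih =>
    simp only [List.cons_append, pvBig, List.length_cons, ih]
    have : 2 ^ (64 * (vs.length + 1)) = 2 ^ 64 * 2 ^ (64 * vs.length) := by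
      rw [← pow_add]; ring_nf
    rw [this]; ring

theorem pvBig_drop (xs : List Int) (m : Nat) :
    pvBig ((xs.map pvU64).drop m) = pvBig (xs.map pvU64) / 2 ^ (64 * m) := by
  by_cases h : m ≤ xs.length
  · have hsplit : xs.map pvU64 = (xs.map pvU64).take m ++ (xs.map pvU64).drop m := by
      simp
    have hlen : ((xs.map pvU64).take m).length = m := by simp; omega
    have htk : pvBig ((xs.map pvU64).take m) < 2 ^ (64 * m) := by
      have h1 := pvBig_lt (xs.take m)
      rw [List.map_take] at h1
      have h2 : (xs.take m).length = m := by simp; omega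
      rw [h2] at h1; exact h1
    conv_rhs => rw [hsplit]
    rw [pvBig_append, hlen]
    rw [Nat.add_mul_div_left _ _ (Nat.two_pow_pos _),
        Nat.div_eq_of_lt htk, Nat.zero_add]
  · push_neg at h
    rw [List.drop_eq_nil_of_le (by simp; omega)]
    have hlt : pvBig (xs.map pvU64) < 2 ^ (64 * m) := by
      have := pvBig_lt xs
      exact lt_of_lt_of_le this (Nat.pow_le_pow_right (by norm_num) (by omega))
    simp [pvBig, Nat.div_eq_of_lt hlt]

theorem pvBig_take (xs : List Int) (m : Nat) :
    pvBig ((xs.map pvU64).take m) = pvBig (xs.map pvU64) % 2 ^ (64 * m) := by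
  have hsplit : xs.map pvU64 = (xs.map pvU64).take m ++ (xs.map pvU64).drop m := by simp
  by_cases h : m ≤ xs.length
  · have hlen : ((xs.map pvU64).take m).length = m := by simp; omega
    have htk : pvBig ((xs.map pvU64).take m) < 2 ^ (64 * m) := by
      have h1 := pvBig_lt (xs.take m)
      rw [List.map_take] at h1
      have h2 : (xs.take m).length = m := by simp; omega
      rw [h2] at h1; exact h1
    conv_rhs => rw [hsplit]
    rw [pvBig_append, hlen, Nat.add_mul_mod_self_left, Nat.mod_eq_of_lt htk]
  · push_neg at h
    rw [List.take_of_length_le (by simp; omega)]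
    have hlt : pvBig (xs.map pvU64) < 2 ^ (64 * m) := by
      have := pvBig_lt xs
      exact lt_of_lt_of_le this (Nat.pow_le_pow_right (by norm_num) (by omega))
    rw [Nat.mod_eq_of_lt hlt]

-- a ||| (b <<< k) = a + b·2^k for a < 2^k
theorem pvOr_disjoint (a b k : Nat) (h : a < 2 ^ k) : a ||| (b <<< k) = a + b * 2 ^ k := by
  rw [Nat.shiftLeft_eq, Nat.lor_comm, mul_comm b (2^k),
      ← Nat.two_pow_add_eq_or_of_lt h, Nat.add_comm]

-- extraction below the already-present bits is unaffected by adding higher bits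
theorem pvExtract_stable (B u d bpb j : Nat) (h : (j + 1) * bpb ≤ d) :
    pvExtract (B + u * 2 ^ d) bpb j = pvExtract B bpb j := by
  unfold pvExtract
  have hexp : (j + 1) * bpb = j * bpb + bpb := by ring
  have hdvd : 2 ^ (j * bpb) ∣ u * 2 ^ d := by
    exact Dvd.dvd.mul_left (pow_dvd_pow 2 (by omega)) u
  rw [Nat.add_div_of_dvd_left hdvd]
  have hq : u * 2 ^ d / 2 ^ (j * bpb) = u * 2 ^ (d - j * bpb) := by
    have hd : u * 2 ^ d = u * 2 ^ (d - j * bpb) * 2 ^ (j * bpb) := by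
      rw [mul_assoc, ← pow_add, Nat.sub_add_cancel (by omega)]
    rw [hd, Nat.mul_div_cancel _ (Nat.two_pow_pos _)]
  rw [hq]
  have hdvd2 : 2 ^ bpb ∣ u * 2 ^ (d - j * bpb) :=
    Dvd.dvd.mul_left (pow_dvd_pow 2 (by omega)) u
  obtain ⟨c, hc⟩ := hdvd2
  rw [hc, Nat.add_mul_mod_self_left]

-- the drain loop, from a consistent state
theorem pvDrain_spec (bpb : Nat) (hb : 0 < bpb) (tb : Int) (B : Nat) :
    ∀ (k N e : Nat), N / bpb - e ≤ k → B < 2 ^ N → e * bpb ≤ N →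
    pvDrain bpb (2 ^ bpb - 1) tb ((List.range e).map (fun j => (pvExtract B bpb j : Int)))
      (B / 2 ^ (e * bpb)) (N - e * bpb)
    = ((List.range (max e (min tb.toNat (N / bpb)))).map (fun j => (pvExtract B bpb j : Int)),
       B / 2 ^ (max e (min tb.toNat (N / bpb)) * bpb),
       N - max e (min tb.toNat (N / bpb)) * bpb) := by
  intro k
  induction k with
  | zero =>
    intro N e hk hB heb
    have hdm := Nat.div_add_mod N bpb
    have hmlt := Nat.mod_lt N hb
    have hmul : (N / bpb) * bpb ≤ e * bpb := Nat.mul_le_mul_right _ (by omega)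
    have hcomm : bpb * (N / bpb) = (N / bpb) * bpb := by ring
    have hstop : N - e * bpb < bpb := by omega
    have hE : max e (min tb.toNat (N / bpb)) = e := by omega
    rw [pvDrain.eq_def]
    split_ifs with hg
    · exact absurd hg.2.1 (by omega)
    · rw [hE]
  | succ k ih =>
    intro N e hk hB heb
    have hlen : (((List.range e).map (fun j => (pvExtract B bpb j : Int))).length : Int)
        = (e : Int) := by simp
    have hmul : (e + 1) * bpb = e * bpb + bpb := by ring
    rw [pvDrain.eq_def]
    split_ifs with hg
    · -- one drain step
      obtain ⟨-, hbits, hlt⟩ := hg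
      rw [hlen] at hlt
      have he1 : (e + 1) * bpb ≤ N := by omega
      have he1div : e + 1 ≤ N / bpb := (Nat.le_div_iff_mul_le hb).mpr he1
      have hetb : e + 1 ≤ tb.toNat := by omega
      have hdec : ((List.range e).map (fun j => (pvExtract B bpb j : Int)))
            ++ [((B / 2 ^ (e * bpb) &&& 2 ^ bpb - 1 : Nat) : Int)]
          = (List.range (e + 1)).map (fun j => (pvExtract B bpb j : Int)) := by
        rw [List.range_succ, List.map_append]
        simp [Nat.and_two_pow_sub_one_eq_mod, pvExtract]
      have hbuf : (B / 2 ^ (e * bpb)) >>> bpb = B / 2 ^ ((e + 1) * bpb) := by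
        rw [Nat.shiftRight_eq_div_pow, Nat.div_div_eq_div_mul, ← pow_add, hmul]
      have hbits' : N - e * bpb - bpb = N - (e + 1) * bpb := by omega
      rw [hdec, hbuf, hbits']
      have := ih N (e + 1) (by omega) hB he1
      rw [this]
      have hE : max (e + 1) (min tb.toNat (N / bpb)) = max e (min tb.toNat (N / bpb)) := by
        omega
      rw [hE]
    · -- the loop stops here
      have hE : max e (min tb.toNat (N / bpb)) = e := by
        rw [hlen] at hg
        by_cases hbits : bpb ≤ N - e * bpb
        · have hlt : ¬ ((e : Int) < tb) := by tauto
          omega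
        · have : N < (e + 1) * bpb := by omega
          have := (Nat.div_lt_iff_lt_mul hb).mpr this
          omega
      rw [hE]

-- the outer fold, from a consistent state
theorem pvFold_spec (bpb : Nat) (hb : 0 < bpb) (tb : Int) :
    ∀ (vs : List Int) (d B : Nat), B < 2 ^ (64 * d) →
    (vs.foldl
      (fun (st : List Int × Nat × Nat) value =>
        pvDrain bpb (2 ^ bpb - 1) tb st.1 (st.2.1 ||| (pvU64 value <<< st.2.2)) (st.2.2 + 64))
      (((List.range (min tb.toNat (64 * d / bpb))).map (fun j => (pvExtract B bpb j : Int))),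
        B / 2 ^ (min tb.toNat (64 * d / bpb) * bpb),
        64 * d - min tb.toNat (64 * d / bpb) * bpb))
    = (((List.range (min tb.toNat (64 * (d + vs.length) / bpb))).map
          (fun j => (pvExtract (B + 2 ^ (64 * d) * pvBig (vs.map pvU64)) bpb j : Int))),
        (B + 2 ^ (64 * d) * pvBig (vs.map pvU64)) / 2 ^ (min tb.toNat (64 * (d + vs.length) / bpb) * bpb),
        64 * (d + vs.length) - min tb.toNat (64 * (d + vs.length) / bpb) * bpb) := by
  intro vs
  induction vs with
  | nil => intro d B hB; simp [pvBig]
  | cons v vs ih =>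
    intro d B hB
    set e := min tb.toNat (64 * d / bpb) with he
    have hediv : e ≤ 64 * d / bpb := by omega
    have heb : e * bpb ≤ 64 * d :=
      le_trans (Nat.mul_le_mul_right _ hediv) (Nat.div_mul_le_self _ _)
    have hu := pvU64_lt v
    have hbuf_lt : B / 2 ^ (e * bpb) < 2 ^ (64 * d - e * bpb) := by
      rw [Nat.div_lt_iff_lt_mul (Nat.two_pow_pos _), ← pow_add]
      have : 64 * d - e * bpb + e * bpb = 64 * d := by omega
      rw [this]; exact hB
    -- the fill step: OR-ing the new long above the buffered bits is addition
    have hfill : B / 2 ^ (e * bpb) ||| (pvU64 v <<< (64 * d - e * bpb))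
        = (B + pvU64 v * 2 ^ (64 * d)) / 2 ^ (e * bpb) := by
      rw [pvOr_disjoint _ _ _ hbuf_lt]
      have hdvd : 2 ^ (e * bpb) ∣ pvU64 v * 2 ^ (64 * d) :=
        Dvd.dvd.mul_left (pow_dvd_pow 2 heb) _
      rw [Nat.add_div_of_dvd_left hdvd]
      congr 1
      have hsplit : pvU64 v * 2 ^ (64 * d)
          = pvU64 v * 2 ^ (64 * d - e * bpb) * 2 ^ (e * bpb) := by
        rw [mul_assoc, ← pow_add, Nat.sub_add_cancel heb]
      rw [hsplit, Nat.mul_div_cancel _ (Nat.two_pow_pos _)]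
    set B1 := B + pvU64 v * 2 ^ (64 * d) with hB1
    have hB1lt : B1 < 2 ^ (64 * (d + 1)) := by
      have hpow : 2 ^ (64 * (d + 1)) = 2 ^ (64 * d) * 2 ^ 64 := by
        rw [← pow_add]; ring_nf
      rw [hB1, hpow]
      nlinarith [Nat.two_pow_pos (64 * d)]
    -- the decoded prefix is unchanged by the new high bits
    have hdec : (List.range e).map (fun j => (pvExtract B bpb j : Int))
        = (List.range e).map (fun j => (pvExtract B1 bpb j : Int)) := by
      apply List.map_congr_left
      intro j hj
      rw [List.mem_range] at hj
      have hjb : (j + 1) * bpb ≤ 64 * d :=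
        le_trans (Nat.mul_le_mul_right _ (by omega)) heb
      rw [hB1, pvExtract_stable B (pvU64 v) (64 * d) bpb j hjb]
    have hbits : 64 * d - e * bpb + 64 = 64 * (d + 1) - e * bpb := by omega
    rw [List.foldl_cons, hdec, hfill, hbits]
    have hstep := pvDrain_spec bpb hb tb B1 (64 * (d + 1) / bpb) (64 * (d + 1)) e
      (Nat.sub_le _ _) hB1lt (le_trans heb (by omega))
    have hmono : e ≤ min tb.toNat (64 * (d + 1) / bpb) := by
      have := Nat.div_le_div_right (c := bpb) (by omega : 64 * d ≤ 64 * (d + 1))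
      omega
    have hE : max e (min tb.toNat (64 * (d + 1) / bpb))
        = min tb.toNat (64 * (d + 1) / bpb) := by omega
    rw [hE] at hstep
    rw [hstep, ih (d + 1) B1 hB1lt]
    have hBIG : B1 + 2 ^ (64 * (d + 1)) * pvBig (vs.map pvU64)
        = B + 2 ^ (64 * d) * pvBig ((v :: vs).map pvU64) := by
      have hpow : 2 ^ (64 * (d + 1)) = 2 ^ (64 * d) * 2 ^ 64 := by
        rw [← pow_add]; ring_nf
      simp only [List.map_cons, pvBig, hB1, hpow]; ring
    have hlen : d + 1 + vs.length = d + (v :: vs).length := by simp; omega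
    rw [hBIG, hlen]

-- the gathered word is the value of the sliced longs
theorem pvGather_aux (xs : List Int) :
    ∀ (s w : Nat), w < 2 ^ (64 * s) →
    (PySem.List.enumerate xs (s : Int)).foldl
        (fun w kv => w ||| (pvU64 kv.2 <<< (64 * kv.1).toNat)) w
      = w + 2 ^ (64 * s) * pvBig (xs.map pvU64) := by
  induction xs with
  | nil => intro s w hw; simp [PySem.List.enumerate_nil, pvBig]
  | cons x xs ih =>
    intro s w hw
    rw [PySem.List.enumerate_cons, List.foldl_cons]
    have hsh : (64 * (s : Int)).toNat = 64 * s := by omega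
    have hu := pvU64_lt x
    have hw' : w + pvU64 x * 2 ^ (64 * s) < 2 ^ (64 * (s + 1)) := by
      have hpow : 2 ^ (64 * (s + 1)) = 2 ^ (64 * s) * 2 ^ 64 := by
        rw [← pow_add]; ring_nf
      rw [hpow]; nlinarith [Nat.two_pow_pos (64 * s)]
    have hcast : (s : Int) + 1 = ((s + 1 : Nat) : Int) := by push_cast; ring
    rw [hsh, pvOr_disjoint _ _ _ hw, hcast, ih (s + 1) _ hw']
    have hpow : 2 ^ (64 * (s + 1)) = 2 ^ (64 * s) * 2 ^ 64 := by
      rw [← pow_add]; ring_nf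
    simp only [List.map_cons, pvBig, hpow]; ring

theorem pvGather_eq (xs : List Int) : pvGather xs = pvBig (xs.map pvU64) := by
  unfold pvGather
  have h := pvGather_aux xs 0 0 (by simp)
  simpa using h

-- ===== VERDICT (by name: the statement is the Claim_ definition above) =====
-- pointwise: B's gathered window equals block k of the concatenated bit string
theorem pvWindow_eq (values : List Int) (bpb k : Nat) (hb : 0 < bpb) :
    ((pvGather (PySem.List.slice values (some ((k * bpb / 64 : Nat) : Int))
        (some ((((k * bpb + bpb - 1) / 64 : Nat) : Int) + 1)))) >>> (k * bpb % 64))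
      &&& (2 ^ bpb - 1)
    = pvExtract (pvBig (values.map pvU64)) bpb k := by
  set start := k * bpb with hstart
  set i0 := start / 64 with hi0
  set off := start % 64 with hoff
  set i1 := (start + bpb - 1) / 64 with hi1
  have hd0 := Nat.div_add_mod start 64
  have hm0 := Nat.mod_lt start (show 0 < 64 by norm_num)
  have hd1 := Nat.div_add_mod (start + bpb - 1) 64
  have hm1 := Nat.mod_lt (start + bpb - 1) (show 0 < 64 by norm_num)
  have hi0le : i0 ≤ i1 := by omega
  set m := i1 + 1 - i0 with hm
  have hoffm : off + bpb ≤ 64 * m := by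
    have : 64 * m = 64 * (i1 + 1) - 64 * i0 := by omega
    omega
  have hcast : ((i1 : Int) + 1) = ((i1 + 1 : Nat) : Int) := by push_cast; ring
  rw [hcast, PySem.List.slice_natCast, pvGather_eq, ← hm]
  rw [List.map_take, List.map_drop]
  have htake := pvBig_take (values.drop i0) m
  rw [List.map_drop] at htake
  rw [htake]
  have hdrop := pvBig_drop values i0
  rw [← List.map_drop, List.map_drop, hdrop]
  rw [Nat.shiftRight_eq_div_pow, Nat.and_two_pow_sub_one_eq_mod]
  have hsplit : (2 : Nat) ^ (64 * m) = 2 ^ off * 2 ^ (64 * m - off) := by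
    rw [← pow_add]; congr 1; omega
  rw [hsplit, Nat.mod_mul_right_div_self,
      Nat.mod_mod_of_dvd _ (pow_dvd_pow 2 (by omega : bpb ≤ 64 * m - off)),
      Nat.div_div_eq_div_mul, ← pow_add]
  unfold pvExtract
  have hfin : 64 * i0 + off = k * bpb := by
    rw [hi0, hoff, hd0]
  rw [hfin]

-- ===== VERDICT (by name: the statement is the Claim_ definition above) =====
theorem decode_packed_blockstates_py_spec : Claim_equal_decode_packed_blockstates_py := by
  unfold Claim_equal_decode_packed_blockstates_py
  intro values p tb _ hpre
  unfold Spec_decode_packed_blockstates_py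
  unfold Pre_decode_packed_blockstates_py at hpre
  unfold decode_packed_blockstates_py decode_packed_blockstates_py_alt
  set bpb := pvBPB p with hbpbdef
  have hb : 0 < bpb := lt_of_lt_of_le (by norm_num) (le_max_left 2 _)
  have hmask : (1 <<< bpb) - 1 = 2 ^ bpb - 1 := by rw [Nat.shiftLeft_eq, one_mul]
  simp only [hmask]
  set n := values.length with hn
  set tbN := tb.toNat with htbN
  set BIG := pvBig (values.map pvU64) with hBIG
  -- the fold produces the first tbN blocks of the concatenated bit string
  have hfold := pvFold_spec bpb hb tb values 0 0 (by simp)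
  norm_num at hfold
  have hEeq : min tbN (64 * n / bpb) = tbN := by
    by_cases htb : 0 < tb
    · have htbcast : tb = ((tbN : Nat) : Int) := by omega
      rw [htbcast] at hpre
      have hpn : ((tbN * bpb : Nat) : Int) ≤ ((64 * n : Nat) : Int) := by push_cast; linarith
      have hle : tbN * bpb ≤ 64 * n := by exact_mod_cast hpn
      have := (Nat.le_div_iff_mul_le hb).mpr hle
      omega
    · have h0 : tbN = 0 := by rw [htbN]; omega
      rw [h0]; simp
  rw [hEeq] at hfold
  rw [hfold]
  have hnotlt : ¬ ((((List.range tbN).map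
      (fun j => (pvExtract BIG bpb j : Int))).length : Int) < tb) := by
    simp only [List.length_map, List.length_range]
    rw [htbN]; omega
  rw [if_neg hnotlt, if_neg (not_lt.mpr hpre), PySem.List.pyRange_zero tb, List.map_map]
  by_cases htb : 0 < tb
  · -- total_blocks > 0: A's final slice is the identity; compare block by block
    have htbcast : tb = ((tbN : Nat) : Int) := by omega
    rw [htbcast, PySem.List.slice_to_natCast, List.take_of_length_le (by simp)]
    apply List.map_congr_left
    intro k hk
    simp only [Function.comp_apply, Int.toNat_natCast]
    exact_mod_cast (pvWindow_eq values bpb k hb).symm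
  · -- total_blocks ≤ 0: both sides are empty
    have h0 : tbN = 0 := by rw [htbN]; omega
    rw [h0, List.range_zero, List.map_nil]
    simp [PySem.List.slice]
    omega
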